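-- pv_equiv track=rewrite | github.com/jupinter/Automatic_Speech_Recognition | speechvalley/feature/madarian/digit2character.py | section2Chinese
-- ===== SOURCE A (Python) =====
-- def section2Chinese(section):
--     '''
--     Converting section to Chinese expression
--     '''
--     result=''
--     charNumSet=['零', '一', '二', '三', '四',
--                 '五', '六', '七', '八', '九']
--     charUnitSet=['', '十', '百', '千']
--     zero=True
--     unitPos=0
--     while section>0:
--         v=section%10
--         if v==0:
--             if section==0 or zero is False:
--                 zero=True
--                 result=charNumSet[v]+result
--         elif (section//10)==0 and v==1 and unitPos==1:
--             result=charUnitSet[1]+result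
--         else:
--             zero=False
--             strIns=charNumSet[v]
--             strIns+=charUnitSet[unitPos]
--             result=strIns+result
--         unitPos+=1
--         section=section//10
--     return result
-- ===== SOURCE B (Python) =====
-- def section2Chinese(section):
--     '''
--     Converting section to Chinese expression
--     '''
--     charNumSet=['零', '一', '二', '三', '四',
--                 '五', '六', '七', '八', '九']
--     charUnitSet=['', '十', '百', '千']
--     if section<=0:
--         return ''
--     digits=[]
--     n=section
--     while n>0:
--         digits.append(n%10)
--         n//=10
--     digits.reverse()
--     result=''
--     pendingZero=False
--     emitted=False
--     k=len(digits)
--     for i in range(k):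
--         d=digits[i]
--         unit=k-1-i
--         if d==0:
--             if emitted:
--                 pendingZero=True
--         else:
--             if pendingZero:
--                 result+='零'
--                 pendingZero=False
--             if d==1 and unit==1 and not emitted:
--                 result+='十'
--             else:
--                 result+=charNumSet[d]+charUnitSet[unit]
--             emitted=True
--     return result
-- ===== Notes on version B (the rewrite author's own statement) =====
-- stated objective: alternative
-- what changed: A prepends pieces in a least-significant-first while-loop with a 'zero' flag that emits 零 eagerly when a lower zero run was followed by a nonzero digit; B first extracts the digit list, then makes one most-significant-first append pass with a pendingZero/emitted state that flushes a single deferred 零 before the next nonzero digit and handles the leading-十 case via the emitted flag.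
import Mathlib
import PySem

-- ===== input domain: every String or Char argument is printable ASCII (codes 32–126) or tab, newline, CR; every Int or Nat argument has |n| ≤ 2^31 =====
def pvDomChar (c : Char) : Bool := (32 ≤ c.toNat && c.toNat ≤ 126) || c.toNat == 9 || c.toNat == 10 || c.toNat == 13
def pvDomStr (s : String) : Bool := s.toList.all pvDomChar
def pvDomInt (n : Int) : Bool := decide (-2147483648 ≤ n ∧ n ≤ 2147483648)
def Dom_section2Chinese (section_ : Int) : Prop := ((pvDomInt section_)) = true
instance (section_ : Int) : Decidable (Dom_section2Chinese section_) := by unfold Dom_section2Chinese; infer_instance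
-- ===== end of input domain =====

-- B restructures A's least-significant-first prepend loop into: extract the digit list,
-- then one most-significant-first append pass with pendingZero/emitted state (objective: alternative).

-- ===== PORT A =====
def pvCharNumSet : List String := ["零", "一", "二", "三", "四", "五", "六", "七", "八", "九"]
def pvCharUnitSet : List String := ["", "十", "百", "千"]

-- A's while loop; fuel only bounds the recursion (the loop exits via section_ ≤ 0).
-- charNumSet[v]/charUnitSet[unitPos] via pyGet?; .getD "" is unreachable inside Pre_.
def pvLoopA (fuel : Nat) (section_ : Int) (result : String) (zero : Bool) (unitPos : Int) : String :=
  match fuel with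
  | 0 => result
  | fuel + 1 =>
    if section_ > 0 then
      let v := PySem.Int.mod section_ 10
      if v = 0 then
        if section_ = 0 ∨ zero = false then
          pvLoopA fuel (PySem.Int.floordiv section_ 10)
            (((PySem.List.pyGet? pvCharNumSet v).getD "") ++ result) true (unitPos + 1)
        else
          pvLoopA fuel (PySem.Int.floordiv section_ 10) result zero (unitPos + 1)
      else if PySem.Int.floordiv section_ 10 = 0 ∧ v = 1 ∧ unitPos = 1 then
        pvLoopA fuel (PySem.Int.floordiv section_ 10)
          (((PySem.List.pyGet? pvCharUnitSet 1).getD "") ++ result) zero (unitPos + 1)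
      else
        let strIns := ((PySem.List.pyGet? pvCharNumSet v).getD "") ++
                      ((PySem.List.pyGet? pvCharUnitSet unitPos).getD "")
        pvLoopA fuel (PySem.Int.floordiv section_ 10) (strIns ++ result) false (unitPos + 1)
    else
      result

def section2Chinese (section_ : Int) : String :=
  pvLoopA (section_.toNat + 1) section_ "" true 0

-- ===== PORT B =====
-- while n>0: digits.append(n%10); n//=10
def pvDigitsB (fuel : Nat) (n : Int) (digits : List Int) : List Int :=
  match fuel with
  | 0 => digits
  | fuel + 1 =>
    if n > 0 then pvDigitsB fuel (PySem.Int.floordiv n 10) (digits ++ [PySem.Int.mod n 10])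
    else digits

-- the for-i-in-range(k) pass; state (result, pendingZero, emitted)
def pvPassB (digits : List Int) (k : Int) (i : Nat) (result : String)
    (pendingZero : Bool) (emitted : Bool) : String :=
  match i, digits with
  | _, [] => result
  | i, d :: rest =>
    let unit := k - 1 - (i : Int)
    if d = 0 then
      pvPassB rest k (i + 1) result (if emitted then true else pendingZero) emitted
    else
      let result := if pendingZero then result ++ "零" else result
      let result :=
        if d = 1 ∧ unit = 1 ∧ emitted = false then result ++ "十"
        else result ++ ((PySem.List.pyGet? pvCharNumSet d).getD "")
                    ++ ((PySem.List.pyGet? pvCharUnitSet unit).getD "")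
      pvPassB rest k (i + 1) result false true

def section2Chinese_alt (section_ : Int) : String :=
  if section_ ≤ 0 then ""
  else
    let digits := (pvDigitsB (section_.toNat + 1) section_ []).reverse
    pvPassB digits (digits.length : Int) 0 "" false false

-- ===== PRECONDITION & SPEC =====
-- Pre_ excludes exactly the inputs where A raises IndexError (a nonzero digit above the
-- thousands place, i.e. section ≥ 10000); B raises there too.
def Pre_section2Chinese (section_ : Int) : Prop := section_ < 10000
instance (section_ : Int) : Decidable (Pre_section2Chinese section_) := by unfold Pre_section2Chinese; infer_instance
def pvWitness_section2Chinese : Int := (1206)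

def Spec_section2Chinese (section_ : Int) (out : String) : Prop := out = section2Chinese_alt section_
instance (section_ : Int) (out : String) : Decidable (Spec_section2Chinese section_ out) := by unfold Spec_section2Chinese; infer_instance

-- ===== CLAIM (what is proved, stated in full; the proofs are below) =====
def Claim_equal_section2Chinese : Prop := ∀ (section_ : Int), Dom_section2Chinese section_ → Pre_section2Chinese section_ → Spec_section2Chinese section_ (section2Chinese section_)

-- ===== LEMMAS AND PROOFS =====
lemma loopA_zero (f : Nat) (r : String) (z : Bool) (u : Int) : pvLoopA f 0 r z u = r := by
  cases f <;> simp [pvLoopA]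

lemma digitsB_done (f : Nat) (n : Int) (acc : List Int) (h : ¬ n > 0) : pvDigitsB f n acc = acc := by
  cases f <;> simp [pvDigitsB, h]

lemma digitsB_zero (f : Nat) (acc : List Int) : pvDigitsB f 0 acc = acc := by
  cases f <;> simp [pvDigitsB]

lemma pvU1 : (PySem.List.pyGet? pvCharUnitSet 1).getD "" = "十" := by decide
lemma pvN0 : (PySem.List.pyGet? pvCharNumSet 0).getD "" = "零" := by decide

lemma AB1 (o : Int) (h1 : 1 ≤ o) (h9 : o ≤ 9) : section2Chinese o = section2Chinese_alt o := by
  have hm : PySem.Int.mod o 10 = o := by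
    rw [PySem.Int.mod_eq_emod_of_pos (show (0:Int) < 10 by norm_num)]; omega
  have hd : PySem.Int.floordiv o 10 = 0 := by
    rw [PySem.Int.floordiv_eq_ediv_of_pos (show (0:Int) < 10 by norm_num)]; omega
  unfold section2Chinese section2Chinese_alt
  rw [pvLoopA]
  simp only [hm, hd, if_pos (show o > 0 by omega), if_neg (show ¬ o = 0 by omega), loopA_zero]
  rw [pvDigitsB]
  simp only [hm, hd, if_pos (show o > 0 by omega), if_neg (show ¬ o ≤ 0 by omega),
    digitsB_done _ _ _ (by omega : ¬ (0:Int) > 0)]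
  simp [pvPassB, show ¬ o = 0 by omega]

lemma AB2 (t o : Int) (ht1 : 1 ≤ t) (ht9 : t ≤ 9) (ho0 : 0 ≤ o) (ho9 : o ≤ 9) :
    section2Chinese (t * 10 + o) = section2Chinese_alt (t * 10 + o) := by
  have hm0 : PySem.Int.mod (t * 10 + o) 10 = o := by
    rw [PySem.Int.mod_eq_emod_of_pos (show (0:Int) < 10 by norm_num)]; omega
  have hd0 : PySem.Int.floordiv (t * 10 + o) 10 = t := by
    rw [PySem.Int.floordiv_eq_ediv_of_pos (show (0:Int) < 10 by norm_num)]; omega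
  have hm1 : PySem.Int.mod t 10 = t := by
    rw [PySem.Int.mod_eq_emod_of_pos (show (0:Int) < 10 by norm_num)]; omega
  have hd1 : PySem.Int.floordiv t 10 = 0 := by
    rw [PySem.Int.floordiv_eq_ediv_of_pos (show (0:Int) < 10 by norm_num)]; omega
  obtain ⟨f, hf⟩ : ∃ f, (t * 10 + o).toNat = f + 1 := ⟨(t * 10 + o).toNat - 1, by omega⟩
  unfold section2Chinese section2Chinese_alt
  rw [hf]
  simp only [pvLoopA, pvDigitsB, hm0, hd0, hm1, hd1, digitsB_zero, loopA_zero,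
    show t * 10 + o > 0 ↔ True by constructor <;> simp <;> omega,
    show t * 10 + o ≤ 0 ↔ False by constructor <;> simp <;> omega,
    show t * 10 + o = 0 ↔ False by constructor <;> simp <;> omega,
    show t > 0 ↔ True by constructor <;> simp <;> omega,
    show t = 0 ↔ False by constructor <;> simp <;> omega]
  by_cases ho : o = 0
  · subst ho
    by_cases ht : t = 1
    · subst ht; simp [pvPassB, pvU1, pvN0, String.append_assoc]
    · simp [pvPassB, pvU1, pvN0, String.append_assoc, ht, show ¬ t = 0 by omega]
  · by_cases ht : t = 1
    · subst ht; simp [pvPassB, pvU1, pvN0, String.append_assoc, ho]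
    · simp [pvPassB, pvU1, pvN0, String.append_assoc, ho, ht, show ¬ t = 0 by omega]

lemma AB3 (h t o : Int) (hh1 : 1 ≤ h) (hh9 : h ≤ 9) (ht0 : 0 ≤ t) (ht9 : t ≤ 9)
    (ho0 : 0 ≤ o) (ho9 : o ≤ 9) :
    section2Chinese (h * 100 + t * 10 + o) = section2Chinese_alt (h * 100 + t * 10 + o) := by
  have hm0 : PySem.Int.mod (h * 100 + t * 10 + o) 10 = o := by
    rw [PySem.Int.mod_eq_emod_of_pos (show (0:Int) < 10 by norm_num)]; omega
  have hd0 : PySem.Int.floordiv (h * 100 + t * 10 + o) 10 = h * 10 + t := by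
    rw [PySem.Int.floordiv_eq_ediv_of_pos (show (0:Int) < 10 by norm_num)]; omega
  have hm1 : PySem.Int.mod (h * 10 + t) 10 = t := by
    rw [PySem.Int.mod_eq_emod_of_pos (show (0:Int) < 10 by norm_num)]; omega
  have hd1 : PySem.Int.floordiv (h * 10 + t) 10 = h := by
    rw [PySem.Int.floordiv_eq_ediv_of_pos (show (0:Int) < 10 by norm_num)]; omega
  have hm2 : PySem.Int.mod h 10 = h := by
    rw [PySem.Int.mod_eq_emod_of_pos (show (0:Int) < 10 by norm_num)]; omega
  have hd2 : PySem.Int.floordiv h 10 = 0 := by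
    rw [PySem.Int.floordiv_eq_ediv_of_pos (show (0:Int) < 10 by norm_num)]; omega
  obtain ⟨f, hf⟩ : ∃ f, (h * 100 + t * 10 + o).toNat = f + 1 + 1 :=
    ⟨(h * 100 + t * 10 + o).toNat - 2, by omega⟩
  unfold section2Chinese section2Chinese_alt
  rw [hf]
  simp only [pvLoopA, pvDigitsB, hm0, hd0, hm1, hd1, hm2, hd2, digitsB_zero, loopA_zero,
    show h * 100 + t * 10 + o > 0 ↔ True by constructor <;> simp <;> omega,
    show h * 100 + t * 10 + o ≤ 0 ↔ False by constructor <;> simp <;> omega,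
    show h * 100 + t * 10 + o = 0 ↔ False by constructor <;> simp <;> omega,
    show h * 10 + t > 0 ↔ True by constructor <;> simp <;> omega,
    show h * 10 + t = 0 ↔ False by constructor <;> simp <;> omega,
    show h > 0 ↔ True by constructor <;> simp <;> omega,
    show h = 0 ↔ False by constructor <;> simp <;> omega]
  by_cases ho : o = 0 <;> by_cases ht : t = 0 <;>
    simp [pvPassB, pvU1, pvN0, String.append_assoc, ho, ht, show ¬ h = 0 by omega]

lemma AB4 (g h t o : Int) (hg1 : 1 ≤ g) (hg9 : g ≤ 9) (hh0 : 0 ≤ h) (hh9 : h ≤ 9)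
    (ht0 : 0 ≤ t) (ht9 : t ≤ 9) (ho0 : 0 ≤ o) (ho9 : o ≤ 9) :
    section2Chinese (g * 1000 + h * 100 + t * 10 + o)
      = section2Chinese_alt (g * 1000 + h * 100 + t * 10 + o) := by
  have hm0 : PySem.Int.mod (g * 1000 + h * 100 + t * 10 + o) 10 = o := by
    rw [PySem.Int.mod_eq_emod_of_pos (show (0:Int) < 10 by norm_num)]; omega
  have hd0 : PySem.Int.floordiv (g * 1000 + h * 100 + t * 10 + o) 10 = g * 100 + h * 10 + t := by
    rw [PySem.Int.floordiv_eq_ediv_of_pos (show (0:Int) < 10 by norm_num)]; omega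
  have hm1 : PySem.Int.mod (g * 100 + h * 10 + t) 10 = t := by
    rw [PySem.Int.mod_eq_emod_of_pos (show (0:Int) < 10 by norm_num)]; omega
  have hd1 : PySem.Int.floordiv (g * 100 + h * 10 + t) 10 = g * 10 + h := by
    rw [PySem.Int.floordiv_eq_ediv_of_pos (show (0:Int) < 10 by norm_num)]; omega
  have hm2 : PySem.Int.mod (g * 10 + h) 10 = h := by
    rw [PySem.Int.mod_eq_emod_of_pos (show (0:Int) < 10 by norm_num)]; omega
  have hd2 : PySem.Int.floordiv (g * 10 + h) 10 = g := by
    rw [PySem.Int.floordiv_eq_ediv_of_pos (show (0:Int) < 10 by norm_num)]; omega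
  have hm3 : PySem.Int.mod g 10 = g := by
    rw [PySem.Int.mod_eq_emod_of_pos (show (0:Int) < 10 by norm_num)]; omega
  have hd3 : PySem.Int.floordiv g 10 = 0 := by
    rw [PySem.Int.floordiv_eq_ediv_of_pos (show (0:Int) < 10 by norm_num)]; omega
  obtain ⟨f, hf⟩ : ∃ f, (g * 1000 + h * 100 + t * 10 + o).toNat = f + 1 + 1 + 1 :=
    ⟨(g * 1000 + h * 100 + t * 10 + o).toNat - 3, by omega⟩
  unfold section2Chinese section2Chinese_alt
  rw [hf]
  simp only [pvLoopA, pvDigitsB, hm0, hd0, hm1, hd1, hm2, hd2, hm3, hd3, digitsB_zero, loopA_zero,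
    show g * 1000 + h * 100 + t * 10 + o > 0 ↔ True by constructor <;> simp <;> omega,
    show g * 1000 + h * 100 + t * 10 + o ≤ 0 ↔ False by constructor <;> simp <;> omega,
    show g * 1000 + h * 100 + t * 10 + o = 0 ↔ False by constructor <;> simp <;> omega,
    show g * 100 + h * 10 + t > 0 ↔ True by constructor <;> simp <;> omega,
    show g * 100 + h * 10 + t = 0 ↔ False by constructor <;> simp <;> omega,
    show g * 10 + h > 0 ↔ True by constructor <;> simp <;> omega,
    show g * 10 + h = 0 ↔ False by constructor <;> simp <;> omega,
    show g > 0 ↔ True by constructor <;> simp <;> omega,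
    show g = 0 ↔ False by constructor <;> simp <;> omega]
  by_cases ho : o = 0 <;> by_cases ht : t = 0 <;> by_cases hh : h = 0 <;>
    simp [pvPassB, pvU1, pvN0, String.append_assoc, ho, ht, hh, show ¬ g = 0 by omega]

lemma pv_nonpos (section_ : Int) (h : section_ ≤ 0) : section2Chinese section_ = "" := by
  unfold section2Chinese pvLoopA
  simp [not_lt.mpr h]

-- ===== VERDICT (by name: the statement is the Claim_ definition above) =====
theorem section2Chinese_spec : Claim_equal_section2Chinese := by
  intro s _ hpre
  unfold Pre_section2Chinese at hpre
  unfold Spec_section2Chinese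
  by_cases h0 : s ≤ 0
  · rw [pv_nonpos s h0]
    unfold section2Chinese_alt
    simp [h0]
  by_cases h1 : s ≤ 9
  · exact AB1 s (by omega) (by omega)
  by_cases h2 : s ≤ 99
  · obtain ⟨t, o, hs, b1, b2, b3, b4⟩ :
        ∃ t o, s = t * 10 + o ∧ 1 ≤ t ∧ t ≤ 9 ∧ 0 ≤ o ∧ o ≤ 9 :=
      ⟨s / 10, s % 10, by omega, by omega, by omega, by omega, by omega⟩
    rw [hs]; exact AB2 t o b1 b2 b3 b4
  by_cases h3 : s ≤ 999
  · obtain ⟨h, t, o, hs, b1, b2, b3, b4, b5, b6⟩ :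
        ∃ h t o, s = h * 100 + t * 10 + o ∧ 1 ≤ h ∧ h ≤ 9 ∧ 0 ≤ t ∧ t ≤ 9 ∧ 0 ≤ o ∧ o ≤ 9 :=
      ⟨s / 100, s / 10 % 10, s % 10, by omega, by omega, by omega, by omega,
        by omega, by omega, by omega⟩
    rw [hs]; exact AB3 h t o b1 b2 b3 b4 b5 b6
  · obtain ⟨g, h, t, o, hs, b1, b2, b3, b4, b5, b6, b7, b8⟩ :
        ∃ g h t o, s = g * 1000 + h * 100 + t * 10 + o ∧
          1 ≤ g ∧ g ≤ 9 ∧ 0 ≤ h ∧ h ≤ 9 ∧ 0 ≤ t ∧ t ≤ 9 ∧ 0 ≤ o ∧ o ≤ 9 :=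
      ⟨s / 1000, s / 100 % 10, s / 10 % 10, s % 10, by omega, by omega,
        by omega, by omega, by omega, by omega, by omega, by omega, by omega⟩
    rw [hs]; exact AB4 g h t o b1 b2 b3 b4 b5 b6 b7 b8
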